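-- pv_equiv track=rewrite | github.com/bartelsj-code/keypad_sequences | Keypad-Check-1/main.py | rightkeychecker
-- ===== SOURCE A (Python) =====
-- def rightkeychecker(rightlst,lst):
--   outlst = []
--   for i in lst:
--     keep = True
--     for j in rightlst:
--       if j not in i:
--         keep = False
--     if keep:
--       outlst.append(i)
--   return outlst
-- ===== SOURCE B (Python) =====
-- def rightkeychecker(rightlst, lst):
--   candidates = list(lst)
--   for j in rightlst:
--     candidates = [i for i in candidates if j in i]
--   return candidates
-- ===== Notes on version B (the rewrite author's own statement) =====
-- stated objective: faster
-- what changed: Transposed the loops: instead of scanning each item and maintaining a keep-flag over all keys, B keeps the required keys as the outer loop and progressively narrows a candidate list with one filtering pass per key, so later keys scan only the survivors.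
import Mathlib
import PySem

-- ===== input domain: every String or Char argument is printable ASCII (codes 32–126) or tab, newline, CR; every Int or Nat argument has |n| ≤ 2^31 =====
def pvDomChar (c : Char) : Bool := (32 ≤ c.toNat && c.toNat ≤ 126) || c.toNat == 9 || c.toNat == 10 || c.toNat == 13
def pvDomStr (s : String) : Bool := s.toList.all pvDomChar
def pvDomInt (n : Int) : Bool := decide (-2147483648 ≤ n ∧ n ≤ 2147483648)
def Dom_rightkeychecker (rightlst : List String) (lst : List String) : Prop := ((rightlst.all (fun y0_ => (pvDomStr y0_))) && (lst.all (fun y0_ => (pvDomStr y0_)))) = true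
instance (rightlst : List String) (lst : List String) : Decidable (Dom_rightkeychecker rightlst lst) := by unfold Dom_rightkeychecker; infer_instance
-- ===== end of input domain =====

-- B replaces A's per-item keep-flag scan by an outer loop over the required keys that
-- progressively filters the candidate list (simpler decomposition; same results).

-- ===== PORT A =====
-- outer loop over lst; inner loop over rightlst maintaining a keep flag; append if kept
def rightkeychecker (rightlst : List String) (lst : List String) : List String :=
  lst.foldl (fun outlst i =>
    let keep := rightlst.foldl (fun keep j =>
      if ¬ PySem.Str.isIn j i then false else keep) true
    if keep then outlst ++ [i] else outlst) []

-- ===== PORT B =====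
-- outer loop over rightlst; each key prunes the candidate list (list comprehension = filter)
def rightkeychecker_alt (rightlst : List String) (lst : List String) : List String :=
  rightlst.foldl (fun candidates j =>
    candidates.filter (fun i => PySem.Str.isIn j i)) lst

-- ===== PRECONDITION & SPEC =====
def Spec_rightkeychecker (rightlst : List String) (lst : List String) (out : List String) : Prop := out = rightkeychecker_alt rightlst lst
instance (rightlst : List String) (lst : List String) (out : List String) : Decidable (Spec_rightkeychecker rightlst lst out) := by unfold Spec_rightkeychecker; infer_instance

-- ===== CLAIM (what is proved, stated in full; the proofs are below) =====
def Claim_equal_rightkeychecker : Prop := ∀ (rightlst : List String) (lst : List String), Dom_rightkeychecker rightlst lst → Spec_rightkeychecker rightlst lst (rightkeychecker rightlst lst)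

-- ===== LEMMAS AND PROOFS =====

-- A's inner keep-flag loop computes `all`
theorem pv_keep_eq_all (rightlst : List String) (i : String) (b : Bool) :
    rightlst.foldl (fun keep j => if ¬ PySem.Str.isIn j i then false else keep) b
      = (b && rightlst.all (fun j => PySem.Str.isIn j i)) := by
  induction rightlst generalizing b with
  | nil => simp
  | cons j rest ih =>
    simp only [List.foldl_cons, List.all_cons, ih]
    cases h : PySem.Str.isIn j i <;> simp

-- A's outer loop is filter (with the accumulator pulled out)
theorem pv_A_eq_filter (lst : List String) (p : String → Bool) (acc : List String) :
    lst.foldl (fun outlst i => if p i then outlst ++ [i] else outlst) acc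
      = acc ++ lst.filter p := by
  induction lst generalizing acc with
  | nil => simp
  | cons i rest ih =>
    cases h : p i <;> simp [List.foldl_cons, h, ih]

-- B's fold of filters is one filter by the conjunction
theorem pv_B_eq_filter (rightlst : List String) (lst : List String) :
    rightlst.foldl (fun candidates j => candidates.filter (fun i => PySem.Str.isIn j i)) lst
      = lst.filter (fun i => rightlst.all (fun j => PySem.Str.isIn j i)) := by
  induction rightlst generalizing lst with
  | nil => simp
  | cons j rest ih =>
    simp only [List.foldl_cons, ih, List.filter_filter, List.all_cons]
    congr 1
    funext i
    cases h : PySem.Str.isIn j i <;> simp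

-- ===== VERDICT (by name: the statement is the Claim_ definition above) =====
theorem rightkeychecker_spec : Claim_equal_rightkeychecker := by
  intro rightlst lst _
  unfold Spec_rightkeychecker rightkeychecker rightkeychecker_alt
  simp only [pv_keep_eq_all, Bool.true_and, pv_B_eq_filter, pv_A_eq_filter, List.nil_append]
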